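-- pv_equiv track=rewrite | github.com/Uttam319/Proteinprediction | 19.py | dot_bracket_from_partition
-- ===== SOURCE A (Python) =====
-- def dot_bracket_from_partition(sequence, breakpoints):
--     structure = ['.'] * len(sequence)
--     for i in range(len(breakpoints) - 1):
--         left = breakpoints[i]
--         right = breakpoints[i + 1]
--         structure[left] = '('
--         structure[right] = ')'
--     return ''.join(structure)
-- ===== SOURCE B (Python) =====
-- def dot_bracket_from_partition(sequence, breakpoints):
--     structure = ['.'] * len(sequence)
--     if len(breakpoints) >= 2:
--         for b in breakpoints[:-1]:
--             structure[b] = '('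
--         structure[breakpoints[-1]] = ')'
--     return ''.join(structure)
-- ===== Notes on version B (the rewrite author's own statement) =====
-- stated objective: simpler
-- what changed: Replaces the paired index loop over range(len(breakpoints)-1), whose overlapping '(' / ')' writes overwrite each other, by the collapsed single pass: '(' at every breakpoint but the last, then ')' at the last, guarded by len(breakpoints) >= 2.
import Mathlib
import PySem

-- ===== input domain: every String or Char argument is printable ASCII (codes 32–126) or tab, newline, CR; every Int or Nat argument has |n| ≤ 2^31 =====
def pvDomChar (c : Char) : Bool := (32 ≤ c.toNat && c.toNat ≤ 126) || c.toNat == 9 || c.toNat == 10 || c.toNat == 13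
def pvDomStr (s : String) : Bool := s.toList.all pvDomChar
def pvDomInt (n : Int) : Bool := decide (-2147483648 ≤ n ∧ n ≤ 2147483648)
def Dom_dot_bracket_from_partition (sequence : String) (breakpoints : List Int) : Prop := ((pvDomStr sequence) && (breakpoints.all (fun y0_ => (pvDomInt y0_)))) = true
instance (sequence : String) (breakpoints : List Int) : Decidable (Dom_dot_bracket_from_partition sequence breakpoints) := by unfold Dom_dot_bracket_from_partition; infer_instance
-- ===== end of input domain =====

-- B collapses A's paired index loop (whose overlapping writes overwrite each other) into one
-- '(' pass over breakpoints[:-1] followed by ')' at breakpoints[-1]. Same return value everywhere.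

-- ===== PORT A =====
def dot_bracket_from_partition (sequence : String) (breakpoints : List Int) : String :=
  String.ofList
    ((PySem.List.pyRange 0 ((breakpoints.length : Int) - 1) 1).foldl
      (fun st i =>
        PySem.List.pySetD
          (PySem.List.pySetD st (PySem.List.pyGetD breakpoints i 0) '(')
          (PySem.List.pyGetD breakpoints (i + 1) 0) ')')
      (List.replicate sequence.toList.length '.'))

-- ===== PORT B =====
def dot_bracket_from_partition_alt (sequence : String) (breakpoints : List Int) : String :=
  if 2 ≤ breakpoints.length then
    String.ofList
      (PySem.List.pySetD
        ((PySem.List.slice breakpoints none (some (-1))).foldl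
          (fun st b => PySem.List.pySetD st b '(')
          (List.replicate sequence.toList.length '.'))
        (PySem.List.pyGetD breakpoints (-1) 0) ')')
  else
    String.ofList (List.replicate sequence.toList.length '.')

-- ===== PRECONDITION & SPEC =====
-- Pre_ excludes exactly the inputs on which Python A raises IndexError (some breakpoint out of
-- range when there are at least two of them); Python B raises there too.
def Pre_dot_bracket_from_partition (sequence : String) (breakpoints : List Int) : Prop :=
  2 ≤ breakpoints.length → ∀ b ∈ breakpoints, PySem.Raise.InRange sequence.toList.length b
instance (sequence : String) (breakpoints : List Int) : Decidable (Pre_dot_bracket_from_partition sequence breakpoints) := by unfold Pre_dot_bracket_from_partition; infer_instance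

def pvWitness_dot_bracket_from_partition : String × List Int := ("ACGU", [0, 2, 3])

def Spec_dot_bracket_from_partition (sequence : String) (breakpoints : List Int) (out : String) : Prop := out = dot_bracket_from_partition_alt sequence breakpoints
instance (sequence : String) (breakpoints : List Int) (out : String) : Decidable (Spec_dot_bracket_from_partition sequence breakpoints out) := by unfold Spec_dot_bracket_from_partition; infer_instance

-- ===== CLAIM (what is proved, stated in full; the proofs are below) =====
def Claim_equal_dot_bracket_from_partition : Prop := ∀ (sequence : String) (breakpoints : List Int), Dom_dot_bracket_from_partition sequence breakpoints → Pre_dot_bracket_from_partition sequence breakpoints → Spec_dot_bracket_from_partition sequence breakpoints (dot_bracket_from_partition sequence breakpoints)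

-- ===== LEMMAS AND PROOFS =====

-- writing twice at the same (possibly negative) Python index keeps only the second write
lemma pySetD_pySetD_self (st : List Char) (i : Int) (a b : Char) :
    PySem.List.pySetD (PySem.List.pySetD st i a) i b = PySem.List.pySetD st i b := by
  unfold PySem.List.pySetD PySem.List.pySet?
  cases h : PySem.List.pyIdx? st.length i with
  | none => simp [h]
  | some k =>
      simp [h, List.set_set]

lemma pyGetD_cons_succ (x : Int) (xs : List Int) (n : Nat) (d : Int) :
    PySem.List.pyGetD (x :: xs) ((n : Int) + 1) d = PySem.List.pyGetD xs (n : Int) d := by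
  have : ((n : Int) + 1) = ((n + 1 : Nat) : Int) := by push_cast; ring
  rw [this, PySem.List.pyGetD_natCast, PySem.List.pyGetD_natCast]
  simp

-- A's loop over range(len(bp)-1) reading bp[i], bp[i+1] is the fold over adjacent pairs
lemma foldl_pyRange_pairs {β : Type} (g : β → Int → Int → β) :
    ∀ (bp : List Int) (st : β),
    (PySem.List.pyRange 0 ((bp.length : Int) - 1) 1).foldl
      (fun st i => g st (PySem.List.pyGetD bp i 0) (PySem.List.pyGetD bp (i + 1) 0)) st
    = (bp.zip bp.tail).foldl (fun st p => g st p.1 p.2) st := by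
  intro bp
  induction bp with
  | nil => intro st; simp [PySem.List.pyRange_one_eq_nil]
  | cons x rest ih =>
      intro st
      cases rest with
      | nil => simp [PySem.List.pyRange_one_eq_nil]
      | cons y rs =>
          -- peel the first index 0 off the range
          have hlen : ((x :: y :: rs).length : Int) - 1 = ((y :: rs).length : Int) := by
            rw [List.length_cons]; push_cast; ring
          rw [hlen]
          have hpos : (0 : Int) < ((y :: rs).length : Int) := by rw [List.length_cons]; omega
          rw [PySem.List.pyRange_one_cons hpos]
          simp only [List.foldl_cons, zero_add]
          -- the remaining range shifted by one
          have hshift :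
              PySem.List.pyRange 1 ((y :: rs).length : Int) 1
                = (PySem.List.pyRange 0 (((y :: rs).length : Int) - 1) 1).map (· + 1) := by
            rw [PySem.List.pyRange_one, PySem.List.pyRange_one]
            simp only [Int.sub_zero, List.map_map]
            apply List.map_congr_left
            intro k _
            simp only [Function.comp_apply]
            omega
          rw [hshift, List.foldl_map]
          have harg : ∀ (s : β) (k : Int), k ∈ PySem.List.pyRange 0 (((y :: rs).length : Int) - 1) 1 →
              g s (PySem.List.pyGetD (x :: y :: rs) (k + 1) 0)
                  (PySem.List.pyGetD (x :: y :: rs) (k + 1 + 1) 0)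
              = g s (PySem.List.pyGetD (y :: rs) k 0) (PySem.List.pyGetD (y :: rs) (k + 1) 0) := by
            intro s k hk
            have hk0 : 0 ≤ k := (PySem.List.mem_pyRange_one.mp hk).1
            obtain ⟨m, rfl⟩ : ∃ m : Nat, k = (m : Int) := ⟨k.toNat, (Int.toNat_of_nonneg hk0).symm⟩
            rw [pyGetD_cons_succ]
            have : ((m : Int) + 1 + 1) = ((m + 1 : Nat) : Int) + 1 := by push_cast; ring
            rw [this, pyGetD_cons_succ]
            push_cast
            rfl
          rw [PySem.List.foldl_congr_mem _ _ _ _ harg]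
          rw [ih]
          -- simplify the two first-step arguments
          have h0 : PySem.List.pyGetD (x :: y :: rs) 0 0 = x := PySem.List.pyGetD_zero_cons ..
          have h1 : PySem.List.pyGetD (x :: y :: rs) 1 0 = y := by
            rw [show (1 : Int) = ((1 : Nat) : Int) from rfl, PySem.List.pyGetD_natCast]; rfl
          rw [h0, h1]
          simp

-- the adjacent-pair fold collapses to B's one '(' pass plus a final ')'
lemma pairs_collapse :
    ∀ (rs : List Int) (x y : Int) (st : List Char),
    ((x :: y :: rs).zip (y :: rs)).foldl
        (fun st p => PySem.List.pySetD (PySem.List.pySetD st p.1 '(') p.2 ')') st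
    = PySem.List.pySetD
        ((x :: y :: rs).dropLast.foldl (fun st b => PySem.List.pySetD st b '(') st)
        ((x :: y :: rs).getLast (by simp)) ')' := by
  intro rs
  induction rs with
  | nil => intro x y st; simp
  | cons z rr ih =>
      intro x y st
      rw [show ((x :: y :: z :: rr).zip (y :: z :: rr)) = (x, y) :: ((y :: z :: rr).zip (z :: rr)) from rfl,
         List.foldl_cons]
      rw [ih y z (PySem.List.pySetD (PySem.List.pySetD st x '(') y ')')]
      have hdl : (x :: y :: z :: rr).dropLast = x :: (y :: z :: rr).dropLast := by
        simp [List.dropLast]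
      rw [hdl]
      have hdl2 : (y :: z :: rr).dropLast = y :: (z :: rr).dropLast := by
        simp [List.dropLast]
      rw [hdl2]
      simp only [List.foldl_cons]
      rw [pySetD_pySetD_self]
      have hlast : (y :: z :: rr).getLast (by simp) = (x :: y :: z :: rr).getLast (by simp) := by
        simp [List.getLast_cons]
      rw [hlast]

-- ===== VERDICT (by name: the statement is the Claim_ definition above) =====
theorem dot_bracket_from_partition_spec : Claim_equal_dot_bracket_from_partition := by
  intro sequence breakpoints _ _
  unfold Spec_dot_bracket_from_partition dot_bracket_from_partition dot_bracket_from_partition_alt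
  cases breakpoints with
  | nil => simp [PySem.List.pyRange_one_eq_nil]
  | cons x rest =>
      cases rest with
      | nil => simp [PySem.List.pyRange_one_eq_nil]
      | cons y rs =>
          rw [foldl_pyRange_pairs (fun st l r => PySem.List.pySetD (PySem.List.pySetD st l '(') r ')')]
          simp only [List.tail_cons]
          rw [pairs_collapse]
          have hif : 2 ≤ (x :: y :: rs).length := by simp
          rw [if_pos hif]
          rw [PySem.List.slice_to_neg_one]
          have hne : (x :: y :: rs) ≠ [] := by simp
          rw [PySem.List.pyGetD_neg_one (x :: y :: rs) 0 hne]
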